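-- pv_equiv track=rewrite | github.com/mprajay999ggh/UHC-Provider-PDF-Text-Extraction | utils.py | merge_comma_separated_lines
-- ===== SOURCE A (Python) =====
-- def merge_comma_separated_lines(text):
--     """Merge lines that end with commas with the following line."""
--     lines = text.split('\n')
--     merged_lines = []
--     buffer = ""
--
--     for line in lines:
--         stripped = line.strip()
--         if buffer:
--             buffer += " " + stripped
--         else:
--             buffer = stripped
--
--         if not stripped.endswith(','):
--             merged_lines.append(buffer)
--             buffer = ""
--
--     # In case last line ends with comma but there's nothing after it
--     if buffer:
--         merged_lines.append(buffer)
--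
--     return "\n".join(merged_lines)
-- ===== SOURCE B (Python) =====
-- def merge_comma_separated_lines(text):
--     """Merge lines that end with commas with the following line (right-to-left pass)."""
--     out = []
--     for line in reversed(text.split('\n')):
--         s = line.strip()
--         if s.endswith(','):
--             if out:
--                 out[0] = s + ' ' + out[0]
--             else:
--                 out = [s]
--         else:
--             out.insert(0, s)
--     return '\n'.join(out)
-- ===== Notes on version B (the rewrite author's own statement) =====
-- stated objective: alternative
-- what changed: B replaces A's forward buffer accumulation with its post-loop flush by a right-to-left pass that glues each comma-ending line onto the head of the already-built group list, so no buffer state and no trailing special case exist.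
import Mathlib
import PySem

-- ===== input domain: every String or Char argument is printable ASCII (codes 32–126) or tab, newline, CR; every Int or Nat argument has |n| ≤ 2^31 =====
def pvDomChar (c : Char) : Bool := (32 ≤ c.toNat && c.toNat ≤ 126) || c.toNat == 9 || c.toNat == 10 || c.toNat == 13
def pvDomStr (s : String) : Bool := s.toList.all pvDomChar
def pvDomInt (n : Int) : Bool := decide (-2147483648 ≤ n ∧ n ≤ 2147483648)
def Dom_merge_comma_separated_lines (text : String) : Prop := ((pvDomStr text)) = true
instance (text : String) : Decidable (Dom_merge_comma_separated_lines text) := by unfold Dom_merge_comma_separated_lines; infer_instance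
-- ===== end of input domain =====

-- B merges by a right-to-left pass that glues a comma-ending line onto the already-built
-- following group, eliminating A's forward buffer and its post-loop flush (objective: alternative).

-- ===== PORT A =====
-- loop body of A's for-loop: state = (merged_lines, buffer)
def pvStepA (st : List (List Char) × List Char) (line : List Char) : List (List Char) × List Char :=
  let stripped := PySem.Chars.strip line
  let buffer := if st.2 ≠ [] then st.2 ++ [' '] ++ stripped else stripped
  if ¬ (PySem.Chars.endswith stripped [','] = true) then (st.1 ++ [buffer], []) else (st.1, buffer)

def merge_comma_separated_lines (text : String) : String :=
  let lines := PySem.Chars.splitOn text.toList ['\n']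
  let st := lines.foldl pvStepA ([], [])
  let merged := if st.2 ≠ [] then st.1 ++ [st.2] else st.1
  String.mk (PySem.Chars.join ['\n'] merged)

-- ===== PORT B =====
-- loop body of B's for-loop over the reversed line list
def pvStepB (out : List (List Char)) (line : List Char) : List (List Char) :=
  let s := PySem.Chars.strip line
  if PySem.Chars.endswith s [','] then
    match out with
    | [] => [s]
    | h :: t => (s ++ [' '] ++ h) :: t
  else s :: out

def merge_comma_separated_lines_alt (text : String) : String :=
  let out := (PySem.Chars.splitOn text.toList ['\n']).reverse.foldl pvStepB []
  String.mk (PySem.Chars.join ['\n'] out)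

-- ===== PRECONDITION & SPEC =====
def Spec_merge_comma_separated_lines (text : String) (out : String) : Prop := out = merge_comma_separated_lines_alt text
instance (text : String) (out : String) : Decidable (Spec_merge_comma_separated_lines text out) := by unfold Spec_merge_comma_separated_lines; infer_instance

-- ===== CLAIM (what is proved, stated in full; the proofs are below) =====
def Claim_equal_merge_comma_separated_lines : Prop := ∀ (text : String), Dom_merge_comma_separated_lines text → Spec_merge_comma_separated_lines text (merge_comma_separated_lines text)

-- ===== LEMMAS AND PROOFS =====

-- A's loop with the post-loop flush, as a front-to-back recursion on the lines with the buffer as parameter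
def pvFA : List (List Char) → List Char → List (List Char)
  | [], b => if b ≠ [] then [b] else []
  | l :: ls, b =>
    let s := PySem.Chars.strip l
    let b' := if b ≠ [] then b ++ [' '] ++ s else s
    if ¬ (PySem.Chars.endswith s [','] = true) then b' :: pvFA ls [] else pvFA ls b'

-- B's loop, as a foldr on the original line order
def pvGB (ls : List (List Char)) : List (List Char) := ls.foldr (fun l out => pvStepB out l) []

lemma pvGB_cons_pos (l : List Char) (ls : List (List Char))
    (he : PySem.Chars.endswith (PySem.Chars.strip l) [','] = true) :
    pvGB (l :: ls) = match pvGB ls with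
                     | [] => [PySem.Chars.strip l]
                     | h :: t => (PySem.Chars.strip l ++ [' '] ++ h) :: t := by
  simp [pvGB, pvStepB, he]

lemma pvGB_cons_neg (l : List Char) (ls : List (List Char))
    (he : ¬ PySem.Chars.endswith (PySem.Chars.strip l) [','] = true) :
    pvGB (l :: ls) = PySem.Chars.strip l :: pvGB ls := by
  simp [pvGB, pvStepB, he]

lemma pvFA_eq_foldl (ls : List (List Char)) (m : List (List Char)) (b : List Char) :
    (let st := ls.foldl pvStepA (m, b); if st.2 ≠ [] then st.1 ++ [st.2] else st.1) = m ++ pvFA ls b := by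
  induction ls generalizing m b with
  | nil => by_cases hb : b = [] <;> simp [pvFA, hb]
  | cons l ls ih =>
    by_cases he : PySem.Chars.endswith (PySem.Chars.strip l) [','] = true
    · have hA : pvStepA (m, b) l =
          (m, if b ≠ [] then b ++ [' '] ++ PySem.Chars.strip l else PySem.Chars.strip l) := by
        simp [pvStepA, he]
      have hF : pvFA (l :: ls) b =
          pvFA ls (if b ≠ [] then b ++ [' '] ++ PySem.Chars.strip l else PySem.Chars.strip l) := by
        simp [pvFA, he]
      simp only [List.foldl_cons, hA, hF]
      exact ih m _
    · have hA : pvStepA (m, b) l =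
          (m ++ [if b ≠ [] then b ++ [' '] ++ PySem.Chars.strip l else PySem.Chars.strip l], []) := by
        simp [pvStepA, he]
      have hF : pvFA (l :: ls) b =
          (if b ≠ [] then b ++ [' '] ++ PySem.Chars.strip l else PySem.Chars.strip l) :: pvFA ls [] := by
        simp [pvFA, he]
      simp only [List.foldl_cons, hA, hF]
      rw [ih (m ++ [_]) []]
      simp

lemma pvEndswith_ne_nil {s : List Char} (h : PySem.Chars.endswith s [','] = true) : s ≠ [] := by
  rw [PySem.Chars.endswith_iff] at h
  rintro rfl
  simpa using h.length_le

lemma pvFA_spec (ls : List (List Char)) :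
    (∀ b : List Char, b ≠ [] → pvFA ls b = match pvGB ls with
                                           | [] => [b]
                                           | h :: t => (b ++ [' '] ++ h) :: t) ∧
      pvFA ls [] = pvGB ls := by
  induction ls with
  | nil => exact ⟨fun b hb => by simp [pvFA, pvGB, hb], by simp [pvFA, pvGB]⟩
  | cons l ls ih =>
    by_cases he : PySem.Chars.endswith (PySem.Chars.strip l) [','] = true
    · constructor
      · intro b hb
        have hb' : b ++ [' '] ++ PySem.Chars.strip l ≠ [] := by simp
        have hF : pvFA (l :: ls) b = pvFA ls (b ++ [' '] ++ PySem.Chars.strip l) := by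
          simp [pvFA, he, hb]
        rw [hF, ih.1 _ hb', pvGB_cons_pos l ls he]
        cases pvGB ls with
        | nil => simp
        | cons h t => simp [List.append_assoc]
      · have hs := pvEndswith_ne_nil he
        have hF : pvFA (l :: ls) [] = pvFA ls (PySem.Chars.strip l) := by
          simp [pvFA, he]
        rw [hF, ih.1 _ hs, pvGB_cons_pos l ls he]
    · constructor
      · intro b hb
        have hF : pvFA (l :: ls) b = (b ++ [' '] ++ PySem.Chars.strip l) :: pvFA ls [] := by
          simp [pvFA, he, hb]
        rw [hF, pvGB_cons_neg l ls he, ih.2]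
      · have hF : pvFA (l :: ls) [] = PySem.Chars.strip l :: pvFA ls [] := by
          simp [pvFA, he]
        rw [hF, pvGB_cons_neg l ls he, ih.2]

-- ===== VERDICT (by name: the statement is the Claim_ definition above) =====
theorem merge_comma_separated_lines_spec : Claim_equal_merge_comma_separated_lines := by
  intro text _
  unfold Spec_merge_comma_separated_lines
  have h := pvFA_eq_foldl (PySem.Chars.splitOn text.toList ['\n']) [] []
  simp only [List.nil_append] at h
  simp only [merge_comma_separated_lines, merge_comma_separated_lines_alt, List.foldl_reverse]
  rw [h, (pvFA_spec _).2]
  rfl
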